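-- pv_equiv track=rewrite | github.com/gnoffl/evo_result_analysis | src/analysis/update_excel_sheet.py | create_gene_mapping
-- ===== SOURCE A (Python) =====
-- from typing import Any, Dict, List, Optional
--
-- def categorize_experiment(experiment: str) -> List[str]:
--     """Categorize an experiment path into its types."""
--     categories = []
--     if 'GOF/GOF_multi_mutation' in experiment:
--         categories.append('GOF_all_SNPs')
--     if 'GOF/GOF_multi_natural' in experiment:
--         categories.append('GOF_natural_SNPs')
--     if 'LOF/LOF_multi_mutation' in experiment:
--         categories.append('LOF_all_SNPs')
--     if 'LOF/LOF_multi_natural' in experiment: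
--         categories.append('LOF_natural_SNPs')
--     return categories
--
-- def create_gene_mapping(gene_data: Dict[str, List[str]]) -> Dict[str, Dict[str, bool]]:
--     """Create a mapping of gene IDs to their presence in experiments."""
--     gene_mapping = {}
--
--     for gene_id, experiments in gene_data.items():
--         gene_mapping[gene_id] = {
--             'GOF_all_SNPs': False,
--             'GOF_natural_SNPs': False,
--             'LOF_all_SNPs': False,
--             'LOF_natural_SNPs': False
--         }
--
--         for experiment in experiments:
--             categories = categorize_experiment(experiment)
--             for category in categories:
--                 gene_mapping[gene_id][category] = True
--
--     return gene_mapping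
-- ===== SOURCE B (Python) =====
-- def create_gene_mapping(gene_data):
--     """Create a mapping of gene IDs to their presence in experiments.
--
--     Instead of categorizing each experiment path separately, join each gene's
--     experiment list into ONE text blob (newline-separated; no category
--     substring contains a newline, so no match can span a boundary) and run
--     each of the four substring searches once over the blob."""
--     gene_mapping = {}
--     for gene_id, experiments in gene_data.items():
--         blob = '\n'.join(experiments)
--         gene_mapping[gene_id] = {
--             'GOF_all_SNPs': 'GOF/GOF_multi_mutation' in blob,
--             'GOF_natural_SNPs': 'GOF/GOF_multi_natural' in blob,
--             'LOF_all_SNPs': 'LOF/LOF_multi_mutation' in blob,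
--             'LOF_natural_SNPs': 'LOF/LOF_multi_natural' in blob,
--         }
--     return gene_mapping
-- ===== Notes on version B (the rewrite author's own statement) =====
-- stated objective: alternative
-- what changed: A loops over each gene's experiments, categorizes every path with categorize_experiment and mutates four boolean flags in a nested dict; B never categorizes individual experiments: it joins each gene's experiment list into one newline-separated blob and runs each of the four category substring searches once over that single string (correct because no category substring contains a newline, so a match cannot span a join boundary).
import Mathlib
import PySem

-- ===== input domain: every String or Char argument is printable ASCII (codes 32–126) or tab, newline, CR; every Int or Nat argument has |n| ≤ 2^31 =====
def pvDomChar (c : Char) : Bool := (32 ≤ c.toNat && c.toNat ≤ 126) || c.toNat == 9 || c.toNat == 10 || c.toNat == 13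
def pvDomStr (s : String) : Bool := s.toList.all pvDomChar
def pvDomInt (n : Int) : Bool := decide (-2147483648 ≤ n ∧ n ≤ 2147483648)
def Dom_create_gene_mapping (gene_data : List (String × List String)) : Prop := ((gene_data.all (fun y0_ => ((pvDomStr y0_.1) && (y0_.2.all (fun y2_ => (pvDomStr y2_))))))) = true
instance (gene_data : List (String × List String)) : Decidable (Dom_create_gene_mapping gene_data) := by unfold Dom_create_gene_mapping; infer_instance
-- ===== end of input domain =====

-- B drops the per-experiment categorization loop: it joins each gene's experiment list into one
-- newline-separated blob and runs each of the four category substring searches once over that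
-- single string (no category substring contains a newline, so matches cannot span a boundary):
-- objective 'alternative', same asymptotic cost.

-- ===== PORT A =====
def categorize_experiment (experiment : String) : List String :=
  let categories : List String := []
  let categories := if PySem.Str.isIn "GOF/GOF_multi_mutation" experiment then categories ++ ["GOF_all_SNPs"] else categories
  let categories := if PySem.Str.isIn "GOF/GOF_multi_natural" experiment then categories ++ ["GOF_natural_SNPs"] else categories
  let categories := if PySem.Str.isIn "LOF/LOF_multi_mutation" experiment then categories ++ ["LOF_all_SNPs"] else categories
  let categories := if PySem.Str.isIn "LOF/LOF_multi_natural" experiment then categories ++ ["LOF_natural_SNPs"] else categories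
  categories

def create_gene_mapping (gene_data : List (String × List String)) : List (String × List (String × Bool)) :=
  let gene_mapping : PySem.Dict String (PySem.Dict String Bool) := PySem.Dict.empty
  let gene_mapping := gene_data.foldl (fun gene_mapping p =>
    -- p.1 = gene_id, p.2 = experiments
    let gene_mapping := gene_mapping.insert p.1 (PySem.Dict.ofList
      [("GOF_all_SNPs", false), ("GOF_natural_SNPs", false),
       ("LOF_all_SNPs", false), ("LOF_natural_SNPs", false)])
    p.2.foldl (fun gene_mapping experiment =>
      (categorize_experiment experiment).foldl (fun gene_mapping category =>
        -- gene_mapping[gene_id][category] = True  (gene_id is present, so modify's default is unused)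
        gene_mapping.modify p.1 PySem.Dict.empty (fun inner => inner.insert category true))
        gene_mapping) gene_mapping) gene_mapping
  gene_mapping.items.map (fun p => (p.1, p.2.items))

-- ===== PORT B =====
def create_gene_mapping_alt (gene_data : List (String × List String)) : List (String × List (String × Bool)) :=
  let gene_mapping : PySem.Dict String (PySem.Dict String Bool) := PySem.Dict.empty
  let gene_mapping := gene_data.foldl (fun gene_mapping p =>
    let blob := PySem.Str.join "\n" p.2
    gene_mapping.insert p.1 (PySem.Dict.ofList
      [("GOF_all_SNPs", PySem.Str.isIn "GOF/GOF_multi_mutation" blob),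
       ("GOF_natural_SNPs", PySem.Str.isIn "GOF/GOF_multi_natural" blob),
       ("LOF_all_SNPs", PySem.Str.isIn "LOF/LOF_multi_mutation" blob),
       ("LOF_natural_SNPs", PySem.Str.isIn "LOF/LOF_multi_natural" blob)])) gene_mapping
  gene_mapping.items.map (fun p => (p.1, p.2.items))

-- ===== PRECONDITION & SPEC =====
def Spec_create_gene_mapping (gene_data : List (String × List String)) (out : List (String × List (String × Bool))) : Prop := out = create_gene_mapping_alt gene_data
instance (gene_data : List (String × List String)) (out : List (String × List (String × Bool))) : Decidable (Spec_create_gene_mapping gene_data out) := by unfold Spec_create_gene_mapping; infer_instance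

-- ===== CLAIM (what is proved, stated in full; the proofs are below) =====
def Claim_equal_create_gene_mapping : Prop := ∀ (gene_data : List (String × List String)), Dom_create_gene_mapping gene_data → Spec_create_gene_mapping gene_data (create_gene_mapping gene_data)

-- ===== LEMMAS AND PROOFS =====

-- STRING SIDE: a pattern without the separator char matches the join iff it matches some part.

lemma prefix_append_cons {α : Type} (c : α) (p a b : List α) (hc : c ∉ p) :
    p <+: a ++ c :: b ↔ p <+: a := by
  induction a generalizing p with
  | nil =>
      cases p with
      | nil => simp
      | cons x p' =>
          simp only [List.nil_append]
          constructor
          · intro h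
            rw [List.cons_prefix_cons] at h
            exact absurd (by simp [h.1]) hc
          · intro h
            simp at h
  | cons y a' ih =>
      cases p with
      | nil => simp
      | cons x p' =>
          simp only [List.cons_append, List.cons_prefix_cons] at *
          rw [ih p' (fun h => hc (List.mem_cons_of_mem _ h))]

lemma infix_append_cons {α : Type} (c : α) (p a b : List α) (hc : c ∉ p) :
    p <:+: a ++ c :: b ↔ p <:+: a ∨ p <:+: b := by
  induction a with
  | nil =>
      rw [List.nil_append, List.infix_cons_iff,
        show (c :: b) = [] ++ c :: b from rfl, prefix_append_cons c p [] b hc]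
      simp
  | cons y a' ih =>
      rw [List.cons_append, List.infix_cons_iff,
        show (y :: (a' ++ c :: b)) = (y :: a') ++ c :: b from rfl,
        prefix_append_cons c p (y :: a') b hc, ih, List.infix_cons_iff]
      tauto

lemma infix_join (p : List Char) (c : Char) (hp : p ≠ []) (hc : c ∉ p) :
    ∀ l : List (List Char), p <:+: PySem.Chars.join [c] l ↔ ∃ e ∈ l, p <:+: e := by
  intro l
  induction l with
  | nil => simp [PySem.Chars.join_nil, hp]
  | cons e rest ih =>
      cases rest with
      | nil => simp [PySem.Chars.join_singleton]
      | cons f rest' =>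
          rw [PySem.Chars.join_cons_cons, List.append_assoc, List.singleton_append,
            infix_append_cons c p e _ hc, ih]
          simp

lemma isIn_join (sub : String) (hp : sub.toList ≠ []) (hc : ('\n' : Char) ∉ sub.toList)
    (exps : List String) :
    PySem.Str.isIn sub (PySem.Str.join "\n" exps) = exps.any (fun e => PySem.Str.isIn sub e) := by
  rw [Bool.eq_iff_iff, PySem.Str.isIn_iff_infix, PySem.Str.toList_join, List.any_eq_true]
  have hnl : ("\n" : String).toList = ['\n'] := rfl
  rw [hnl, infix_join sub.toList '\n' hp hc]
  constructor
  · rintro ⟨e, he, hinf⟩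
    obtain ⟨s, hs, rfl⟩ := List.mem_map.mp he
    exact ⟨s, hs, (PySem.Str.isIn_iff_infix _ _).mpr hinf⟩
  · rintro ⟨s, hs, hinf⟩
    exact ⟨s.toList, List.mem_map_of_mem hs, (PySem.Str.isIn_iff_infix _ _).mp hinf⟩

-- DICT SIDE: overwriting the same key twice keeps only the second value.

lemma insert_insert_self {κ ν : Type} [BEq κ] [LawfulBEq κ]
    (d : PySem.Dict κ ν) (k : κ) (v w : ν) :
    (d.insert k v).insert k w = d.insert k w := by
  apply PySem.Dict.ext
  by_cases h : d.contains k = true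
  · rw [PySem.Dict.items_insert_of_contains _ w (PySem.Dict.contains_insert_self d k v),
      PySem.Dict.items_insert_of_contains d v h,
      PySem.Dict.items_insert_of_contains d w h, List.map_map]
    refine List.map_congr_left ?_
    intro p _
    by_cases hk : p.1 == k <;> simp [hk]
  · have hf : d.contains k = false := Bool.eq_false_iff.mpr h
    have h' : ∀ q ∈ d.items, (q.1 == k) = false := by
      intro q hq
      by_contra hqq
      exact h (List.any_eq_true.mpr ⟨q, hq, by simpa using hqq⟩)
    rw [PySem.Dict.items_insert_of_contains _ w (PySem.Dict.contains_insert_self d k v),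
      PySem.Dict.items_insert_of_not_contains d v hf,
      PySem.Dict.items_insert_of_not_contains d w hf,
      List.map_append]
    congr 1
    · conv_rhs => rw [← List.map_id d.items]
      refine List.map_congr_left ?_
      intro q hq
      simp [h' q hq]
    · simp

-- A's inner 'modify g' loops, run on a mapping whose entry for g was just written, only
-- rewrite that entry.

lemma cats_fold_modify (g : String) (cs : List String) :
    ∀ (d : PySem.Dict String (PySem.Dict String Bool)) (inner : PySem.Dict String Bool),
    cs.foldl (fun gm c => gm.modify g PySem.Dict.empty (fun i => i.insert c true)) (d.insert g inner)
      = d.insert g (cs.foldl (fun i c => i.insert c true) inner) := by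
  induction cs with
  | nil => intro d inner; rfl
  | cons c rest ih =>
      intro d inner
      rw [List.foldl_cons, List.foldl_cons]
      have hstep : (d.insert g inner).modify g PySem.Dict.empty (fun i => i.insert c true)
          = d.insert g (inner.insert c true) := by
        show (d.insert g inner).insert g
            (((d.insert g inner).getD g PySem.Dict.empty).insert c true) = _
        rw [PySem.Dict.getD_insert_self, insert_insert_self]
      rw [hstep, ih]

lemma exps_fold_modify (g : String) (exps : List String) :
    ∀ (d : PySem.Dict String (PySem.Dict String Bool)) (inner : PySem.Dict String Bool),
    exps.foldl (fun gm e => (categorize_experiment e).foldl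
        (fun gm c => gm.modify g PySem.Dict.empty (fun i => i.insert c true)) gm)
        (d.insert g inner)
      = d.insert g (exps.foldl (fun i e =>
          (categorize_experiment e).foldl (fun i c => i.insert c true) i) inner) := by
  induction exps with
  | nil => intro d inner; rfl
  | cons e rest ih =>
      intro d inner
      rw [List.foldl_cons, cats_fold_modify, ih, List.foldl_cons]

-- the fixed-shape inner dictionary with its four flags
def fourD (b1 b2 b3 b4 : Bool) : PySem.Dict String Bool :=
  PySem.Dict.mk [("GOF_all_SNPs", b1), ("GOF_natural_SNPs", b2), ("LOF_all_SNPs", b3), ("LOF_natural_SNPs", b4)]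

lemma fourD_ins1 (b1 b2 b3 b4 : Bool) :
    (fourD b1 b2 b3 b4).insert "GOF_all_SNPs" true = fourD true b2 b3 b4 := rfl
lemma fourD_ins2 (b1 b2 b3 b4 : Bool) :
    (fourD b1 b2 b3 b4).insert "GOF_natural_SNPs" true = fourD b1 true b3 b4 := rfl
lemma fourD_ins3 (b1 b2 b3 b4 : Bool) :
    (fourD b1 b2 b3 b4).insert "LOF_all_SNPs" true = fourD b1 b2 true b4 := rfl
lemma fourD_ins4 (b1 b2 b3 b4 : Bool) :
    (fourD b1 b2 b3 b4).insert "LOF_natural_SNPs" true = fourD b1 b2 b3 true := rfl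

-- one experiment's categories, folded as insertions of 'true', update the four flags by 'or'
lemma cat_fold (e : String) (b1 b2 b3 b4 : Bool) :
    (categorize_experiment e).foldl (fun d c => d.insert c true) (fourD b1 b2 b3 b4)
      = fourD (b1 || PySem.Str.isIn "GOF/GOF_multi_mutation" e)
              (b2 || PySem.Str.isIn "GOF/GOF_multi_natural" e)
              (b3 || PySem.Str.isIn "LOF/LOF_multi_mutation" e)
              (b4 || PySem.Str.isIn "LOF/LOF_multi_natural" e) := by
  cases h1 : PySem.Str.isIn "GOF/GOF_multi_mutation" e <;>
  cases h2 : PySem.Str.isIn "GOF/GOF_multi_natural" e <;>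
  cases h3 : PySem.Str.isIn "LOF/LOF_multi_mutation" e <;>
  cases h4 : PySem.Str.isIn "LOF/LOF_multi_natural" e <;>
  · simp at h1 h2 h3 h4
    simp [categorize_experiment, h1, h2, h3, h4,
          fourD_ins1, fourD_ins2, fourD_ins3, fourD_ins4]

-- the whole experiment loop, on the pure inner dictionary
lemma exps_fold (exps : List String) : ∀ b1 b2 b3 b4 : Bool,
    exps.foldl (fun d e => (categorize_experiment e).foldl (fun d c => d.insert c true) d)
        (fourD b1 b2 b3 b4)
      = fourD (b1 || exps.any (fun e => PySem.Str.isIn "GOF/GOF_multi_mutation" e))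
              (b2 || exps.any (fun e => PySem.Str.isIn "GOF/GOF_multi_natural" e))
              (b3 || exps.any (fun e => PySem.Str.isIn "LOF/LOF_multi_mutation" e))
              (b4 || exps.any (fun e => PySem.Str.isIn "LOF/LOF_multi_natural" e)) := by
  induction exps with
  | nil => intro b1 b2 b3 b4; simp [List.foldl]
  | cons e rest ih =>
      intro b1 b2 b3 b4
      simp only [List.foldl_cons, cat_fold, ih, List.any_cons, Bool.or_assoc]

-- per gene, A's block and B's block perform the SAME dictionary update
lemma step_eq (gm : PySem.Dict String (PySem.Dict String Bool)) (g : String) (exps : List String) :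
    (exps.foldl (fun gm' e => (categorize_experiment e).foldl
        (fun gm' c => gm'.modify g PySem.Dict.empty (fun inner => inner.insert c true)) gm')
      (gm.insert g (PySem.Dict.ofList
        [("GOF_all_SNPs", false), ("GOF_natural_SNPs", false),
         ("LOF_all_SNPs", false), ("LOF_natural_SNPs", false)])))
    = gm.insert g (PySem.Dict.ofList
        [("GOF_all_SNPs", PySem.Str.isIn "GOF/GOF_multi_mutation" (PySem.Str.join "\n" exps)),
         ("GOF_natural_SNPs", PySem.Str.isIn "GOF/GOF_multi_natural" (PySem.Str.join "\n" exps)),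
         ("LOF_all_SNPs", PySem.Str.isIn "LOF/LOF_multi_mutation" (PySem.Str.join "\n" exps)),
         ("LOF_natural_SNPs", PySem.Str.isIn "LOF/LOF_multi_natural" (PySem.Str.join "\n" exps))]) := by
  have h0 : (PySem.Dict.ofList
      [("GOF_all_SNPs", false), ("GOF_natural_SNPs", false),
       ("LOF_all_SNPs", false), ("LOF_natural_SNPs", false)] : PySem.Dict String Bool)
      = fourD false false false false := rfl
  rw [h0, exps_fold_modify, exps_fold]
  congr 1
  rw [isIn_join _ (by decide) (by decide) exps, isIn_join _ (by decide) (by decide) exps,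
      isIn_join _ (by decide) (by decide) exps, isIn_join _ (by decide) (by decide) exps]
  cases hx1 : exps.any (fun e => PySem.Str.isIn "GOF/GOF_multi_mutation" e) <;>
  cases hx2 : exps.any (fun e => PySem.Str.isIn "GOF/GOF_multi_natural" e) <;>
  cases hx3 : exps.any (fun e => PySem.Str.isIn "LOF/LOF_multi_mutation" e) <;>
  cases hx4 : exps.any (fun e => PySem.Str.isIn "LOF/LOF_multi_natural" e) <;>
  rfl

-- the two gene loops agree from any accumulator
lemma outer_eq : ∀ (gd : List (String × List String)) (gm : PySem.Dict String (PySem.Dict String Bool)),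
    gd.foldl (fun gene_mapping p =>
      let gene_mapping := gene_mapping.insert p.1 (PySem.Dict.ofList
        [("GOF_all_SNPs", false), ("GOF_natural_SNPs", false),
         ("LOF_all_SNPs", false), ("LOF_natural_SNPs", false)])
      p.2.foldl (fun gene_mapping experiment =>
        (categorize_experiment experiment).foldl (fun gene_mapping category =>
          gene_mapping.modify p.1 PySem.Dict.empty (fun inner => inner.insert category true))
          gene_mapping) gene_mapping) gm
    = gd.foldl (fun gene_mapping p =>
      let blob := PySem.Str.join "\n" p.2
      gene_mapping.insert p.1 (PySem.Dict.ofList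
        [("GOF_all_SNPs", PySem.Str.isIn "GOF/GOF_multi_mutation" blob),
         ("GOF_natural_SNPs", PySem.Str.isIn "GOF/GOF_multi_natural" blob),
         ("LOF_all_SNPs", PySem.Str.isIn "LOF/LOF_multi_mutation" blob),
         ("LOF_natural_SNPs", PySem.Str.isIn "LOF/LOF_multi_natural" blob)])) gm := by
  intro gd
  induction gd with
  | nil => intro gm; rfl
  | cons p rest ih =>
      intro gm
      rw [List.foldl_cons, List.foldl_cons, ← ih]
      congr 1
      exact step_eq gm p.1 p.2

-- ===== VERDICT (by name: the statement is the Claim_ definition above) =====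
theorem create_gene_mapping_spec : Claim_equal_create_gene_mapping := by
  intro gd _hdom
  unfold Spec_create_gene_mapping create_gene_mapping create_gene_mapping_alt
  simp only [outer_eq]
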